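-- pv_equiv track=rewrite | github.com/ryandancy/project-euler | problem98.py | map_to_indices
-- ===== SOURCE A (Python) =====
-- def map_to_indices(s, return_dict=False):
--   letter_idxs = {}
--   idxs = []
--   counter = 0
--
--   for letter in s:
--     if letter not in letter_idxs:
--       letter_idxs[letter] = counter
--       counter += 1
--     idxs.append(letter_idxs[letter])
--
--   if return_dict:
--     return idxs, letter_idxs
--   else:
--     return idxs
-- ===== SOURCE B (Python) =====
-- def map_to_indices(s, return_dict=False):
--   # No mapping built up while scanning: each character's index is the number of
--   # distinct characters strictly before its first occurrence in s.
--   idxs = [len(set(s[:s.index(c)])) for c in s]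
--   if return_dict:
--     return idxs, {c: len(set(s[:s.index(c)])) for c in s}
--   else:
--     return idxs
-- ===== Notes on version B (the rewrite author's own statement) =====
-- stated objective: alternative
-- what changed: Drops A's incrementally built dict/counter entirely: each character's index is computed directly as the number of distinct characters strictly before its first occurrence (len(set(s[:s.index(c)]))), a per-character closed form instead of a stateful scan (quadratic, so not faster).
-- outside the precondition, e.g. on map_to_indices('ab', True): A returns [[0, 1], {'a': 0, 'b': 1}], B returns [[0, 1], {'a': 0, 'b': 1}]
import Mathlib
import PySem

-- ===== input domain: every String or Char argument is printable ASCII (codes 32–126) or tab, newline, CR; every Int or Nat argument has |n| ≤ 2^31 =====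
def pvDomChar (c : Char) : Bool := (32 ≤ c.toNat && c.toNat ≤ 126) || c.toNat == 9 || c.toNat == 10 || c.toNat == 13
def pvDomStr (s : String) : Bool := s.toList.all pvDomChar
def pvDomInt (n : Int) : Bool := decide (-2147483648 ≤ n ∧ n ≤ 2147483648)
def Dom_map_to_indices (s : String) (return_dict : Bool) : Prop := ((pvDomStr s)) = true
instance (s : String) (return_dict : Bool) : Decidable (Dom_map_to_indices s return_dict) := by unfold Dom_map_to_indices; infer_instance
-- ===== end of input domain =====

-- B drops A's incrementally built dict/counter: each character's index is computed directly as the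
-- number of distinct characters strictly before its first occurrence; objective: alternative (B is
-- quadratic, not faster). Pre_ excludes return_dict = true, where the Python returns a (list, dict)
-- TUPLE, not a value of the declared List Int type (both Pythons return the identical tuple there).


-- ===== PORT A =====
-- the for-loop of A: state (letter_idxs, idxs, counter)
def mtiLoopA : List Char → PySem.Dict Char Int → List Int → Int → List Int
  | [], _, idxs, _ => idxs
  | letter :: rest, letter_idxs, idxs, counter =>
    if letter_idxs.contains letter then
      -- letter_idxs[letter]: key present, so getD with any default is exact
      mtiLoopA rest letter_idxs (idxs ++ [letter_idxs.getD letter 0]) counter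
    else
      mtiLoopA rest (letter_idxs.insert letter counter)
        (idxs ++ [(letter_idxs.insert letter counter).getD letter 0]) (counter + 1)

-- under Pre_ (return_dict = false) A returns idxs
def map_to_indices (s : String) (return_dict : Bool) : List Int :=
  mtiLoopA s.toList PySem.Dict.empty [] 0

-- ===== PORT B =====
-- len(set(s[:s.index(c)])): s.index raises only for c ∉ s, which cannot happen for c drawn from s
def mtiB (l : List Char) (c : Char) : Int :=
  match PySem.List.index? l c with
  | some k => ((PySem.Set.ofList (PySem.List.slice l none (some (k : Int)))).length : Int)
  | none => 0

def map_to_indices_alt (s : String) (return_dict : Bool) : List Int :=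
  s.toList.map (fun c => mtiB s.toList c)

-- ===== PRECONDITION & SPEC =====
-- Pre_ excludes return_dict = true: there A returns a (list, dict) tuple, which is not a value of
-- the declared return type List Int; both Pythons return the identical tuple on those inputs.
def Pre_map_to_indices (s : String) (return_dict : Bool) : Prop := return_dict = false
instance (s : String) (return_dict : Bool) : Decidable (Pre_map_to_indices s return_dict) := by unfold Pre_map_to_indices; infer_instance
def pvWitness_map_to_indices : String × Bool := ("hello world", false)

def Spec_map_to_indices (s : String) (return_dict : Bool) (out : List Int) : Prop := out = map_to_indices_alt s return_dict
instance (s : String) (return_dict : Bool) (out : List Int) : Decidable (Spec_map_to_indices s return_dict out) := by unfold Spec_map_to_indices; infer_instance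

-- ===== CLAIM (what is proved, stated in full; the proofs are below) =====
def Claim_equal_map_to_indices : Prop := ∀ (s : String) (return_dict : Bool), Dom_map_to_indices s return_dict → Pre_map_to_indices s return_dict → Spec_map_to_indices s return_dict (map_to_indices s return_dict)

-- ===== LEMMAS AND PROOFS =====

-- idxOf of an element of l is unchanged by appending
lemma idxOf_append_left {l t : List Char} {c : Char} (h : c ∈ l) :
    List.idxOf c (l ++ t) = List.idxOf c l := by
  induction l with
  | nil => cases h
  | cons x l ih =>
    by_cases hx : x = c
    · subst hx; simp [List.idxOf_cons_self]
    · rcases List.mem_cons.mp h with h | h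
      · exact absurd h.symm hx
      · simp [hx, ih h]

lemma idxOf_append_singleton_self {l : List Char} {c : Char} (h : c ∉ l) :
    List.idxOf c (l ++ [c]) = l.length := by
  induction l with
  | nil => simp
  | cons x l ih =>
    have hx : x ≠ c := fun e => h (e ▸ List.mem_cons_self)
    simp [hx, ih (fun m => h (List.mem_cons_of_mem _ m))]

-- the fold over Set.add only appends
lemma foldl_add_extends (t : List Char) (u : List Char) :
    ∃ ex, t.foldl PySem.Set.add u = u ++ ex := by
  induction t generalizing u with
  | nil => exact ⟨[], by simp⟩
  | cons x t ih =>
    rcases ih (PySem.Set.add u x) with ⟨ex, hex⟩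
    rw [PySem.Set.add_eq_ite] at hex
    by_cases hm : x ∈ u
    · exact ⟨ex, by simpa [hm] using hex⟩
    · exact ⟨x :: ex, by simpa [hm] using hex⟩

lemma idxOf_foldl_add {t u : List Char} {c : Char} (h : c ∈ u) :
    List.idxOf c (t.foldl PySem.Set.add u) = List.idxOf c u := by
  rcases foldl_add_extends t u with ⟨ex, hex⟩
  rw [hex, idxOf_append_left h]

-- A's loop computes the first-occurrence indices relative to the final unique-character list
lemma mtiLoopA_spec : ∀ (t u : List Char) (d : PySem.Dict Char Int) (idxs : List Int),
    (∀ ch, d.contains ch = decide (ch ∈ u)) →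
    (∀ ch, ch ∈ u → d.getD ch 0 = (List.idxOf ch u : Int)) →
    mtiLoopA t d idxs (u.length : Int)
      = idxs ++ t.map (fun c => ((t.foldl PySem.Set.add u).idxOf c : Int)) := by
  intro t
  induction t with
  | nil => intro u d idxs _ _; simp [mtiLoopA]
  | cons ch rest ih =>
    intro u d idxs hc hg
    by_cases hm : ch ∈ u
    · have hadd : PySem.Set.add u ch = u := PySem.Set.add_of_mem hm
      have : mtiLoopA (ch :: rest) d idxs (u.length : Int)
          = mtiLoopA rest d (idxs ++ [d.getD ch 0]) (u.length : Int) := by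
        simp [mtiLoopA, hc ch, hm]
      rw [this, ih u d _ hc hg]
      simp [List.foldl_cons, hadd, hg ch hm, idxOf_foldl_add hm, List.append_assoc]
    · have hadd : PySem.Set.add u ch = u ++ [ch] := PySem.Set.add_of_not_mem hm
      have hlen : ((u.length : Int) + 1) = ((u ++ [ch]).length : Int) := by
        simp
      have hstep : mtiLoopA (ch :: rest) d idxs (u.length : Int)
          = mtiLoopA rest (d.insert ch (u.length : Int))
              (idxs ++ [(d.insert ch (u.length : Int)).getD ch 0]) ((u.length : Int) + 1) := by
        simp [mtiLoopA, hc ch, hm]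
      have hc' : ∀ x, (d.insert ch (u.length : Int)).contains x = decide (x ∈ u ++ [ch]) := by
        intro x
        rw [PySem.Dict.contains_insert, hc x]
        by_cases hx : x = ch <;> simp [hx]
      have hg' : ∀ x, x ∈ u ++ [ch] →
          (d.insert ch (u.length : Int)).getD x 0 = (List.idxOf x (u ++ [ch]) : Int) := by
        intro x hxm
        rw [PySem.Dict.getD_insert]
        by_cases hx : x = ch
        · subst hx; simp [idxOf_append_singleton_self hm]
        · have hxu : x ∈ u := by
            rcases List.mem_append.mp hxm with h | h
            · exact h
            · exact absurd (List.mem_singleton.mp h) hx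
          simp [hx, hg x hxu, idxOf_append_left hxu]
      rw [hstep, hlen, ih (u ++ [ch]) _ _ hc' hg']
      have hself : (d.insert ch (u.length : Int)).getD ch 0 = (u.length : Int) :=
        PySem.Dict.getD_insert_self _ _ _ _
      have hchm : ch ∈ u ++ [ch] := List.mem_append.mpr (Or.inr (List.mem_singleton.mpr rfl))
      simp [List.foldl_cons, hadd, hself, idxOf_foldl_add hchm,
        idxOf_append_singleton_self hm, List.append_assoc]

-- B's per-character formula equals c's index in the deduplicated list
lemma mtiB_eq_idxOf_ofList {l : List Char} {c : Char} (h : c ∈ l) :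
    mtiB l c = ((PySem.Set.ofList l).idxOf c : Int) := by
  obtain ⟨k, hk⟩ := Option.isSome_iff_exists.mp ((PySem.List.index?_isSome_iff l c).mpr h)
  obtain ⟨pre, suf, hdecomp, hlen, hpre⟩ := (PySem.List.index?_eq_some_iff l c k).mp hk
  have hslice : PySem.List.slice l none (some (k : Int)) = pre := by
    rw [PySem.List.slice_to_natCast, hdecomp, ← hlen, List.take_left]
  -- c ∉ ofList pre
  have hpre' : c ∉ PySem.Set.ofList pre := fun m => hpre ((PySem.Set.mem_ofList _ _).mp m)
  have hofl : PySem.Set.ofList l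
      = suf.foldl PySem.Set.add (PySem.Set.ofList pre ++ [c]) := by
    rw [hdecomp]
    show (pre ++ c :: suf).foldl PySem.Set.add [] = _
    rw [List.foldl_append, List.foldl_cons,
      show List.foldl PySem.Set.add [] pre = PySem.Set.ofList pre from
        (PySem.Set.ofList_eq_foldl pre).symm,
      PySem.Set.add_of_not_mem hpre']
  have hcm : c ∈ PySem.Set.ofList pre ++ [c] :=
    List.mem_append.mpr (Or.inr (List.mem_singleton.mpr rfl))
  simp only [mtiB, hk, hslice, hofl, idxOf_foldl_add hcm,
    idxOf_append_singleton_self hpre']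

-- ===== VERDICT (by name: the statement is the Claim_ definition above) =====
theorem map_to_indices_spec : Claim_equal_map_to_indices := by
  intro s rd _ _
  unfold Spec_map_to_indices map_to_indices map_to_indices_alt
  have hA := mtiLoopA_spec s.toList [] PySem.Dict.empty []
    (fun ch => by simp [PySem.Dict.contains_empty])
    (fun ch h => by cases h)
  simp only [List.length_nil, Nat.cast_zero] at hA
  rw [hA, List.nil_append]
  apply List.map_congr_left
  intro c hcs
  rw [mtiB_eq_idxOf_ofList hcs, PySem.Set.ofList_eq_foldl]
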